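-- pv_equiv track=rewrite | github.com/grapheneaffiliate/h4-polytopic-attention | solve_arc_b14.py | solve_941d9a10
-- ===== SOURCE A (Python) =====
-- import copy
--
-- def solve_941d9a10(grid):
--     grid = copy.deepcopy(grid)
--     rows, cols = len(grid), len(grid[0])
--
--     # Find horizontal and vertical lines of 5
--     h_lines = [r for r in range(rows) if all(grid[r][c] == 5 for c in range(cols))]
--     v_lines = [c for c in range(cols) if all(grid[r][c] == 5 for r in range(rows))]
--
--     h_bounds = [-1] + h_lines + [rows]
--     v_bounds = [-1] + v_lines + [cols]
--
--     # Build cell grid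
--     n_cell_rows = len(h_bounds) - 1
--     n_cell_cols = len(v_bounds) - 1
--
--     cell_grid = {}
--     for i in range(n_cell_rows):
--         for j in range(n_cell_cols):
--             r1, r2 = h_bounds[i] + 1, h_bounds[i + 1]
--             c1, c2 = v_bounds[j] + 1, v_bounds[j + 1]
--             if r1 < r2 and c1 < c2:
--                 cell_grid[(i, j)] = (r1, r2, c1, c2)
--
--     # Color 3 diagonal cells: top-left(0,0)=1, center=2, bottom-right=3
--     colored = [
--         (0, 0, 1),
--         (n_cell_rows // 2, n_cell_cols // 2, 2),
--         (n_cell_rows - 1, n_cell_cols - 1, 3),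
--     ]
--
--     for ci, cj, color in colored:
--         if (ci, cj) in cell_grid:
--             r1, r2, c1, c2 = cell_grid[(ci, cj)]
--             for r in range(r1, r2):
--                 for c in range(c1, c2):
--                     if grid[r][c] == 0:
--                         grid[r][c] = color
--
--     return grid
-- ===== SOURCE B (Python) =====
-- def solve_941d9a10(grid):
--     cols = len(grid[0])
--     hline = [all(v == 5 for v in row[:cols]) for row in grid]
--     vline = [all(row[c] == 5 for row in grid) for c in range(cols)]
--     n, m = sum(hline) + 1, sum(vline) + 1
--     targets = {(n - 1, m - 1): 3, (n // 2, m // 2): 2, (0, 0): 1}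
--     ci = [sum(hline[:r]) for r in range(len(grid))]
--     cj = [sum(vline[:c]) for c in range(cols)]
--
--     def pix(r, c, v):
--         if c >= cols or v != 0 or hline[r] or vline[c]:
--             return v
--         return targets.get((ci[r], cj[c]), 0)
--
--     return [[pix(r, c, v) for c, v in enumerate(row)] for r, row in enumerate(grid)]
-- ===== Notes on version B (the rewrite author's own statement) =====
-- stated objective: alternative
-- what changed: B replaces A's partition-into-cells algorithm (h_bounds/v_bounds, a dict of cell rectangles, and in-place rectangle fills) by per-pixel classification: each zero pixel computes its cell coordinates as prefix counts of separator lines above/left of it and looks them up in a reverse-priority target dict, in one comprehension sweep; no bounds lists or cell table exist.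
import Mathlib
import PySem

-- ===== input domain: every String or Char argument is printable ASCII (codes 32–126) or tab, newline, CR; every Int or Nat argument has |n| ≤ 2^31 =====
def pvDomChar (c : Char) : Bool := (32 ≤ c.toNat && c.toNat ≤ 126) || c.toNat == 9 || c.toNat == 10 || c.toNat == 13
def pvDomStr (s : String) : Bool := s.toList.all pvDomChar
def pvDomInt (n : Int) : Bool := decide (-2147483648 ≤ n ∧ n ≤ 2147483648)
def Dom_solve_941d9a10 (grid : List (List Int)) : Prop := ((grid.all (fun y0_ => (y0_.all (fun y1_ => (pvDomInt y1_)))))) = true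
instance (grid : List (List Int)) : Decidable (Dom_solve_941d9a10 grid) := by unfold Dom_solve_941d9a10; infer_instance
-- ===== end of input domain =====

-- B replaces A's cell-partition algorithm (bounds lists + cell-rectangle dict + in-place
-- rectangle fills) by a per-pixel classification sweep using prefix counts of separator lines
-- and a reverse-priority target dict (alternative algorithm, similar cost).
-- A deep-copies its argument, so neither version mutates the caller's grid.

-- ===== PORT A =====
-- A's in-place painting loop ('for r in range(r1,r2): for c in range(c1,c2): if grid[r][c]==0: grid[r][c]=color');
-- the indices produced by the ranges are ≥ 0 and (on inputs in Pre_) in range, where pyGetD/List.set are exact.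
def pvPaintCellA (color r1 r2 c1 c2 : Int) (g : List (List Int)) : List (List Int) :=
  (PySem.List.pyRange r1 r2).foldl (fun g r =>
    (PySem.List.pyRange c1 c2).foldl (fun g c =>
      if PySem.List.pyGetD (PySem.List.pyGetD g r []) c 0 = 0 then
        g.set r.toNat ((PySem.List.pyGetD g r []).set c.toNat color)
      else g) g) g

def solve_941d9a10 (grid : List (List Int)) : List (List Int) :=
  let rows : Int := (grid.length : Int)
  let cols : Int := ((grid.headD []).length : Int)   -- grid[0]; Pre_ excludes the empty grid
  let h_lines : List Int := (PySem.List.pyRange 0 rows).filter (fun r =>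
    (PySem.List.pyRange 0 cols).all (fun c =>
      PySem.List.pyGetD (PySem.List.pyGetD grid r []) c 0 == 5))
  let v_lines : List Int := (PySem.List.pyRange 0 cols).filter (fun c =>
    (PySem.List.pyRange 0 rows).all (fun r =>
      PySem.List.pyGetD (PySem.List.pyGetD grid r []) c 0 == 5))
  let h_bounds : List Int := [(-1 : Int)] ++ h_lines ++ [rows]
  let v_bounds : List Int := [(-1 : Int)] ++ v_lines ++ [cols]
  let n_cell_rows : Int := (h_bounds.length : Int) - 1
  let n_cell_cols : Int := (v_bounds.length : Int) - 1
  let cell_grid : PySem.Dict (Int × Int) (Int × Int × Int × Int) :=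
    (PySem.List.pyRange 0 n_cell_rows).foldl (fun d i =>
      (PySem.List.pyRange 0 n_cell_cols).foldl (fun d j =>
        if PySem.List.pyGetD h_bounds i 0 + 1 < PySem.List.pyGetD h_bounds (i + 1) 0 ∧
           PySem.List.pyGetD v_bounds j 0 + 1 < PySem.List.pyGetD v_bounds (j + 1) 0 then
          d.insert (i, j) (PySem.List.pyGetD h_bounds i 0 + 1, PySem.List.pyGetD h_bounds (i + 1) 0,
                           PySem.List.pyGetD v_bounds j 0 + 1, PySem.List.pyGetD v_bounds (j + 1) 0)
        else d) d) PySem.Dict.empty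
  let colored : List (Int × Int × Int) :=
    [(0, 0, 1),
     (PySem.Int.floordiv n_cell_rows 2, PySem.Int.floordiv n_cell_cols 2, 2),
     (n_cell_rows - 1, n_cell_cols - 1, 3)]
  colored.foldl (fun g t =>
    match cell_grid.get? (t.1, t.2.1) with
    | some (r1, r2, c1, c2) => pvPaintCellA t.2.2 r1 r2 c1 c2 g
    | none => g) grid

-- ===== PORT B =====
-- B's per-pixel classification sweep: prefix counts of separator lines give each pixel its
-- cell coordinates; a reverse-priority dict maps the three diagonal cells to their colors.
def solve_941d9a10_alt (grid : List (List Int)) : List (List Int) :=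
  let cols : Int := ((grid.headD []).length : Int)
  let hline : List Bool := (PySem.List.pyRange 0 (grid.length : Int)).map (fun r =>
    (PySem.List.slice (PySem.List.pyGetD grid r []) none (some cols)).all (fun v => v == 5))
  let vline : List Bool := (PySem.List.pyRange 0 cols).map (fun c =>
    grid.all (fun row => PySem.List.pyGetD row c 0 == 5))
  let n : Int := (hline.count true : Int) + 1
  let m : Int := (vline.count true : Int) + 1
  let targets : PySem.Dict (Int × Int) Int :=
    (((PySem.Dict.empty : PySem.Dict (Int × Int) Int).insert (n - 1, m - 1) 3).insert
        (PySem.Int.floordiv n 2, PySem.Int.floordiv m 2) 2).insert (0, 0) 1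
  let ci : List Int := (PySem.List.pyRange 0 (grid.length : Int)).map (fun r =>
    ((PySem.List.slice hline none (some r)).count true : Int))
  let cj : List Int := (PySem.List.pyRange 0 cols).map (fun c =>
    ((PySem.List.slice vline none (some c)).count true : Int))
  (PySem.List.enumerate grid).map (fun rp =>
    (PySem.List.enumerate rp.2).map (fun cp =>
      if cols ≤ cp.1 ∨ ¬ cp.2 = 0 ∨ PySem.List.pyGetD hline rp.1 false = true ∨
         PySem.List.pyGetD vline cp.1 false = true then cp.2
      else targets.getD (PySem.List.pyGetD ci rp.1 0, PySem.List.pyGetD cj cp.1 0) 0))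

-- ===== PRECONDITION & SPEC =====
-- Pre_ excludes the empty grid and ragged grids with a row shorter than the first row: A raises
-- IndexError on virtually all of them, and on the few where short-circuiting lets A return, which
-- inputs those are is an accident of A's evaluation order, not part of the function's grid domain.
def Pre_solve_941d9a10 (grid : List (List Int)) : Prop :=
  grid ≠ [] ∧ ∀ row ∈ grid, (grid.headD []).length ≤ row.length
instance (grid : List (List Int)) : Decidable (Pre_solve_941d9a10 grid) := by
  unfold Pre_solve_941d9a10; infer_instance

def pvWitness_solve_941d9a10 : List (List Int) := [[0, 5, 0], [5, 5, 5], [0, 5, 0]]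

def Spec_solve_941d9a10 (grid : List (List Int)) (out : List (List Int)) : Prop :=
  out = solve_941d9a10_alt grid
instance (grid : List (List Int)) (out : List (List Int)) : Decidable (Spec_solve_941d9a10 grid out) := by
  unfold Spec_solve_941d9a10; infer_instance

-- ===== CLAIM (what is proved, stated in full; the proofs are below) =====
def Claim_equal_solve_941d9a10 : Prop := ∀ (grid : List (List Int)), Dom_solve_941d9a10 grid → Pre_solve_941d9a10 grid → Spec_solve_941d9a10 grid (solve_941d9a10 grid)

-- ===== LEMMAS AND PROOFS =====

-- B's painting of one cell written as a full-grid comprehension rebuild (proof intermediate)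
def pvPaintCellB (color r1 r2 c1 c2 : Int) (g : List (List Int)) : List (List Int) :=
  (PySem.List.enumerate g).map (fun rp =>
    (PySem.List.enumerate rp.2).map (fun cp =>
      if r1 ≤ rp.1 ∧ rp.1 < r2 ∧ c1 ≤ cp.1 ∧ cp.1 < c2 ∧ cp.2 = 0 then color else cp.2))

-- pointwise map over a grid, indexed by (row, column) (proof intermediate)
def pvPmap (f : Int → Int → Int → Int) (g : List (List Int)) : List (List Int) :=
  (PySem.List.enumerate g).map (fun rp =>
    (PySem.List.enumerate rp.2).map (fun cp => f rp.1 cp.1 cp.2))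

-- the pointwise effect of painting one (possibly degenerate) cell
def pvStep (HB VB : List Int) (ci cj color : Int) (r c v : Int) : Int :=
  if PySem.List.pyGetD HB ci 0 + 1 ≤ r ∧ r < PySem.List.pyGetD HB (ci + 1) 0 ∧
     PySem.List.pyGetD VB cj 0 + 1 ≤ c ∧ c < PySem.List.pyGetD VB (cj + 1) 0 ∧ v = 0 then
    color else v

theorem pv_set_getD_self {α : Type} (g : List α) (n : Nat) (d : α) :
    g.set n (g.getD n d) = g := by
  by_cases h : n < g.length
  · apply List.ext_getElem (by simp)
    intro i h1 h2
    rw [List.getElem_set]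
    split_ifs with hni
    · subst hni; exact List.getD_eq_getElem _ _ h
    · rfl
  · rw [List.getD_eq_default _ _ (by omega), List.set_eq_of_length_le (by omega)]

theorem pv_pyRange_nil {a b : Int} (h : b ≤ a) : PySem.List.pyRange a b = [] := by
  rw [List.eq_nil_iff_forall_not_mem]
  intro x hx
  rw [PySem.List.mem_pyRange_one] at hx
  omega

-- pointwise characterisation of '(enumerate xs).map f = (enumerate ys).map g'
theorem pv_map_enum_ext {α β γ : Type} (xs : List α) (ys : List β)
    (f : Int × α → γ) (g : Int × β → γ) (hlen : xs.length = ys.length)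
    (h : ∀ (k : Nat) (hk : k < xs.length),
      f ((k : Int), xs[k]) = g ((k : Int), ys[k]'(by omega))) :
    (PySem.List.enumerate xs).map f = (PySem.List.enumerate ys).map g := by
  apply List.ext_getElem (by simp [PySem.List.length_enumerate, hlen])
  intro k h1 h2
  have hk : k < xs.length := by simpa [PySem.List.length_enumerate] using h1
  simp only [List.getElem_map, PySem.List.getElem_enumerate]
  simpa using h k hk

-- A's inner column loop over one row equals the per-row comprehension on that row
theorem pv_paint_row (color c2 : Int) :
    ∀ (k : Nat) (c1 : Int), 0 ≤ c1 → (c2 - c1).toNat = k →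
    ∀ (g : List (List Int)) (r : Int), 0 ≤ r →
    (PySem.List.pyRange c1 c2).foldl (fun g c =>
      if PySem.List.pyGetD (PySem.List.pyGetD g r []) c 0 = 0 then
        g.set r.toNat ((PySem.List.pyGetD g r []).set c.toNat color)
      else g) g
    = g.set r.toNat ((PySem.List.enumerate (PySem.List.pyGetD g r [])).map
        (fun cp => if c1 ≤ cp.1 ∧ cp.1 < c2 ∧ cp.2 = 0 then color else cp.2)) := by
  intro k
  induction k with
  | zero =>
    intro c1 hc1 hk g r hr
    have hge : c2 ≤ c1 := by omega
    have hmap : (PySem.List.enumerate (PySem.List.pyGetD g r [])).map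
        (fun cp => if c1 ≤ cp.1 ∧ cp.1 < c2 ∧ cp.2 = 0 then color else cp.2)
        = (PySem.List.enumerate (PySem.List.pyGetD g r [])).map (fun cp => cp.2) := by
      apply List.map_congr_left
      intro cp _
      rw [if_neg]
      rintro ⟨h1, h2, -⟩
      omega
    rw [pv_pyRange_nil hge, List.foldl_nil, hmap, PySem.List.map_snd_enumerate,
        PySem.List.pyGetD_of_nonneg _ _ hr]
    exact (pv_set_getD_self g r.toNat []).symm
  | succ k ih =>
    intro c1 hc1 hk g r hr
    have hlt : c1 < c2 := by omega
    have hpg : ∀ (g' : List (List Int)), PySem.List.pyGetD g' r [] = g'.getD r.toNat [] :=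
      fun g' => PySem.List.pyGetD_of_nonneg _ _ hr
    rw [PySem.List.pyRange_one_cons hlt, List.foldl_cons]
    by_cases h0 : PySem.List.pyGetD (PySem.List.pyGetD g r []) c1 0 = 0
    · rw [if_pos h0, ih (c1 + 1) (by omega) (by omega) _ r hr]
      by_cases hn : r.toNat < g.length
      · have hrow : PySem.List.pyGetD (g.set r.toNat ((PySem.List.pyGetD g r []).set c1.toNat color)) r []
            = (PySem.List.pyGetD g r []).set c1.toNat color := by
          rw [hpg, List.getD_eq_getElem _ _ (by simpa using hn), List.getElem_set]
          simp
        rw [hrow, List.set_set]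
        refine congrArg (g.set r.toNat) ?_
        have hc1' : PySem.List.pyGetD (PySem.List.pyGetD g r []) c1 0
            = (PySem.List.pyGetD g r []).getD c1.toNat 0 := PySem.List.pyGetD_of_nonneg _ _ hc1
        apply pv_map_enum_ext _ _ _ _ (by simp)
        intro kk hkk
        have hkk' : kk < (PySem.List.pyGetD g r []).length := by simpa using hkk
        dsimp only
        rw [List.getElem_set]
        by_cases hkc : c1.toNat = kk
        · have hkci : (kk : Int) = c1 := by omega
          rw [if_pos hkc]
          have hrow0 : (PySem.List.pyGetD g r [])[kk] = 0 := by
            rw [← List.getD_eq_getElem _ 0 hkk', ← hkc, ← hc1']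
            exact h0
          rw [if_neg (by rintro ⟨ha, -⟩; omega), if_pos ⟨by omega, by omega, hrow0⟩]
        · have hkci : (kk : Int) ≠ c1 := by omega
          rw [if_neg hkc]
          by_cases hcond : c1 ≤ (kk : Int) ∧ (kk : Int) < c2 ∧ (PySem.List.pyGetD g r [])[kk] = 0
          · rw [if_pos ⟨by omega, hcond.2⟩, if_pos hcond]
          · rw [if_neg (fun hc => hcond ⟨by omega, hc.2⟩), if_neg hcond]
      · have hle : g.length ≤ r.toNat := by omega
        rw [List.set_eq_of_length_le (by simpa using hle)]
        have hnil : PySem.List.pyGetD g r [] = [] := by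
          rw [hpg]
          exact List.getD_eq_default _ _ hle
        rw [hnil]
        rfl
    · rw [if_neg h0, ih (c1 + 1) (by omega) (by omega) g r hr]
      refine congrArg (g.set r.toNat) ?_
      apply pv_map_enum_ext _ _ _ _ rfl
      intro kk hkk
      dsimp only
      by_cases hkc : (kk : Int) = c1
      · have hkcn : c1.toNat = kk := by omega
        have hne0 : ¬ (PySem.List.pyGetD g r [])[kk] = 0 := by
          rw [← List.getD_eq_getElem _ 0 hkk, ← hkcn]
          rw [PySem.List.pyGetD_of_nonneg _ _ hc1] at h0
          exact h0
        rw [if_neg (by rintro ⟨ha, -⟩; omega), if_neg (by rintro ⟨-, -, hz⟩; exact hne0 hz)]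
      · by_cases hcond : c1 ≤ (kk : Int) ∧ (kk : Int) < c2 ∧ (PySem.List.pyGetD g r [])[kk] = 0
        · rw [if_pos ⟨by omega, hcond.2⟩, if_pos hcond]
        · rw [if_neg (fun hc => hcond ⟨by omega, hc.2⟩), if_neg hcond]

-- A's full nested painting loop equals the comprehension rebuild
theorem pv_paint_col (color c1 c2 r2 : Int) (hc1 : 0 ≤ c1) :
    ∀ (k : Nat) (r1 : Int), 0 ≤ r1 → (r2 - r1).toNat = k →
    ∀ (g : List (List Int)),
    (PySem.List.pyRange r1 r2).foldl (fun g r =>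
      (PySem.List.pyRange c1 c2).foldl (fun g c =>
        if PySem.List.pyGetD (PySem.List.pyGetD g r []) c 0 = 0 then
          g.set r.toNat ((PySem.List.pyGetD g r []).set c.toNat color)
        else g) g) g
    = (PySem.List.enumerate g).map (fun rp =>
        (PySem.List.enumerate rp.2).map (fun cp =>
          if r1 ≤ rp.1 ∧ rp.1 < r2 ∧ c1 ≤ cp.1 ∧ cp.1 < c2 ∧ cp.2 = 0 then color else cp.2)) := by
  intro k
  induction k with
  | zero =>
    intro r1 hr1 hk g
    have hge : r2 ≤ r1 := by omega
    have hmap : (PySem.List.enumerate g).map (fun rp =>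
        (PySem.List.enumerate rp.2).map (fun cp =>
          if r1 ≤ rp.1 ∧ rp.1 < r2 ∧ c1 ≤ cp.1 ∧ cp.1 < c2 ∧ cp.2 = 0 then color else cp.2))
        = (PySem.List.enumerate g).map (fun rp => rp.2) := by
      apply List.map_congr_left
      intro rp _
      have hin : (PySem.List.enumerate rp.2).map (fun cp =>
          if r1 ≤ rp.1 ∧ rp.1 < r2 ∧ c1 ≤ cp.1 ∧ cp.1 < c2 ∧ cp.2 = 0 then color else cp.2)
          = (PySem.List.enumerate rp.2).map (fun cp => cp.2) := by
        apply List.map_congr_left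
        intro cp _
        rw [if_neg]
        rintro ⟨h1, h2, -⟩
        omega
      rw [hin, PySem.List.map_snd_enumerate]
    rw [pv_pyRange_nil hge, List.foldl_nil, hmap, PySem.List.map_snd_enumerate]
  | succ k ih =>
    intro r1 hr1 hk g
    have hlt : r1 < r2 := by omega
    rw [PySem.List.pyRange_one_cons hlt, List.foldl_cons]
    rw [pv_paint_row color c2 (c2 - c1).toNat c1 hc1 rfl g r1 hr1]
    rw [ih (r1 + 1) (by omega) (by omega)]
    by_cases hn : r1.toNat < g.length
    · apply pv_map_enum_ext _ _ _ _ (by simp)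
      intro kk hkk
      have hkk' : kk < g.length := by simpa using hkk
      dsimp only
      rw [List.getElem_set]
      by_cases hkc : r1.toNat = kk
      · subst hkc
        have hkci : ((r1.toNat : Nat) : Int) = r1 := by omega
        rw [if_pos rfl]
        have hrowk : g[r1.toNat] = PySem.List.pyGetD g r1 [] := by
          rw [PySem.List.pyGetD_of_nonneg _ _ hr1,
              List.getD_eq_getElem _ _ (by omega)]
        have hL : (PySem.List.enumerate ((PySem.List.enumerate (PySem.List.pyGetD g r1 [])).map
              (fun cp => if c1 ≤ cp.1 ∧ cp.1 < c2 ∧ cp.2 = 0 then color else cp.2))).map (fun cp =>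
            if r1 + 1 ≤ ((r1.toNat : Nat) : Int) ∧ ((r1.toNat : Nat) : Int) < r2 ∧ c1 ≤ cp.1 ∧ cp.1 < c2 ∧ cp.2 = 0 then color else cp.2)
            = (PySem.List.enumerate ((PySem.List.enumerate (PySem.List.pyGetD g r1 [])).map
              (fun cp => if c1 ≤ cp.1 ∧ cp.1 < c2 ∧ cp.2 = 0 then color else cp.2))).map (fun cp => cp.2) := by
          apply List.map_congr_left
          intro cp _
          rw [if_neg]
          rintro ⟨ha, -⟩
          omega
        rw [hL, PySem.List.map_snd_enumerate, hrowk]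
        apply List.map_congr_left
        intro cp _
        by_cases hcond : c1 ≤ cp.1 ∧ cp.1 < c2 ∧ cp.2 = 0
        · rw [if_pos hcond, if_pos ⟨by omega, by omega, hcond⟩]
        · rw [if_neg hcond, if_neg (fun hc => hcond hc.2.2)]
      · have hkci : (kk : Int) ≠ r1 := by omega
        rw [if_neg hkc]
        apply List.map_congr_left
        intro cp _
        by_cases hcond : r1 ≤ (kk : Int) ∧ (kk : Int) < r2 ∧ c1 ≤ cp.1 ∧ cp.1 < c2 ∧ cp.2 = 0
        · rw [if_pos ⟨by omega, hcond.2⟩, if_pos hcond]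
        · rw [if_neg (fun hc => hcond ⟨by omega, hc.2⟩), if_neg hcond]
    · have hle : g.length ≤ r1.toNat := by omega
      rw [List.set_eq_of_length_le (by simpa using hle)]
      apply pv_map_enum_ext _ _ _ _ rfl
      intro kk hkk
      dsimp only
      apply List.map_congr_left
      intro cp _
      rw [if_neg (by rintro ⟨ha, -⟩; omega), if_neg (by rintro ⟨ha, -⟩; omega)]

theorem pv_paint_cell_eq (color r1 r2 c1 c2 : Int) (g : List (List Int))
    (hr1 : 0 ≤ r1) (hc1 : 0 ≤ c1) :
    pvPaintCellA color r1 r2 c1 c2 g = pvPaintCellB color r1 r2 c1 c2 g := by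
  unfold pvPaintCellA pvPaintCellB
  exact pv_paint_col color c1 c2 r2 hc1 (r2 - r1).toNat r1 hr1 rfl g

-- characterisation of A's cell_grid dict: one row of the building loop
theorem pv_dict_inner (hb vb : List Int) (i : Int) (L : List Int)
    (d : PySem.Dict (Int × Int) (Int × Int × Int × Int)) (a b : Int) :
    (L.foldl (fun d j =>
        if PySem.List.pyGetD hb i 0 + 1 < PySem.List.pyGetD hb (i + 1) 0 ∧
           PySem.List.pyGetD vb j 0 + 1 < PySem.List.pyGetD vb (j + 1) 0 then
          d.insert (i, j) (PySem.List.pyGetD hb i 0 + 1, PySem.List.pyGetD hb (i + 1) 0,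
                           PySem.List.pyGetD vb j 0 + 1, PySem.List.pyGetD vb (j + 1) 0)
        else d) d).get? (a, b)
    = if a = i ∧ b ∈ L ∧ (PySem.List.pyGetD hb a 0 + 1 < PySem.List.pyGetD hb (a + 1) 0 ∧
           PySem.List.pyGetD vb b 0 + 1 < PySem.List.pyGetD vb (b + 1) 0) then
        some (PySem.List.pyGetD hb a 0 + 1, PySem.List.pyGetD hb (a + 1) 0,
              PySem.List.pyGetD vb b 0 + 1, PySem.List.pyGetD vb (b + 1) 0)
      else d.get? (a, b) := by
  induction L generalizing d with
  | nil => simp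
  | cons j t ih =>
    rw [List.foldl_cons, ih]
    by_cases hp : PySem.List.pyGetD hb i 0 + 1 < PySem.List.pyGetD hb (i + 1) 0 ∧
        PySem.List.pyGetD vb j 0 + 1 < PySem.List.pyGetD vb (j + 1) 0
    · rw [if_pos hp, PySem.Dict.get?_insert]
      by_cases ha : a = i
      · subst ha
        by_cases hbj : b = j
        · subst hbj
          simp only [List.mem_cons]
          split_ifs <;> simp_all
        · simp only [List.mem_cons]
          split_ifs <;> simp_all
      · simp only [List.mem_cons]
        split_ifs <;> simp_all
    · rw [if_neg hp]
      by_cases ha : a = i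
      · subst ha
        by_cases hbj : b = j
        · subst hbj
          simp only [List.mem_cons]
          split_ifs <;> simp_all
        · simp only [List.mem_cons]
          split_ifs <;> simp_all
      · simp only [List.mem_cons]
        split_ifs <;> simp_all

theorem pv_dict_outer (hb vb : List Int) (L1 L2 : List Int)
    (d : PySem.Dict (Int × Int) (Int × Int × Int × Int)) (a b : Int) :
    (L1.foldl (fun d i => L2.foldl (fun d j =>
        if PySem.List.pyGetD hb i 0 + 1 < PySem.List.pyGetD hb (i + 1) 0 ∧
           PySem.List.pyGetD vb j 0 + 1 < PySem.List.pyGetD vb (j + 1) 0 then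
          d.insert (i, j) (PySem.List.pyGetD hb i 0 + 1, PySem.List.pyGetD hb (i + 1) 0,
                           PySem.List.pyGetD vb j 0 + 1, PySem.List.pyGetD vb (j + 1) 0)
        else d) d) d).get? (a, b)
    = if a ∈ L1 ∧ b ∈ L2 ∧ (PySem.List.pyGetD hb a 0 + 1 < PySem.List.pyGetD hb (a + 1) 0 ∧
           PySem.List.pyGetD vb b 0 + 1 < PySem.List.pyGetD vb (b + 1) 0) then
        some (PySem.List.pyGetD hb a 0 + 1, PySem.List.pyGetD hb (a + 1) 0,
              PySem.List.pyGetD vb b 0 + 1, PySem.List.pyGetD vb (b + 1) 0)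
      else d.get? (a, b) := by
  induction L1 generalizing d with
  | nil => simp
  | cons i t ih =>
    rw [List.foldl_cons, ih]
    rw [pv_dict_inner]
    by_cases ha : a = i
    · subst ha
      simp only [List.mem_cons]
      split_ifs <;> simp_all
    · simp only [List.mem_cons]
      split_ifs <;> simp_all

-- entries of the bounds lists are ≥ -1
theorem pv_bent (l : List Int) (hl : ∀ x ∈ l, -1 ≤ x) (i : Int)
    (h1 : 0 ≤ i) (h2 : i < (l.length : Int)) : -1 ≤ PySem.List.pyGetD l i 0 := by
  rw [PySem.List.pyGetD_of_nonneg _ _ h1, List.getD_eq_getElem _ _ (by omega)]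
  exact hl _ (List.getElem_mem _)

-- the per-target-cell step of A (dict lookup + in-place paint) as a direct bounds test + rebuild
theorem pv_key_eq (hb vb : List Int)
    (hhb : ∀ x ∈ hb, -1 ≤ x) (hvb : ∀ x ∈ vb, -1 ≤ x)
    (ci cj color : Int) (h1 : 0 ≤ ci) (h2 : ci < (hb.length : Int) - 1)
    (h3 : 0 ≤ cj) (h4 : cj < (vb.length : Int) - 1) (g : List (List Int)) :
    (match (List.foldl (fun d i => List.foldl (fun d j =>
        if PySem.List.pyGetD hb i 0 + 1 < PySem.List.pyGetD hb (i + 1) 0 ∧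
           PySem.List.pyGetD vb j 0 + 1 < PySem.List.pyGetD vb (j + 1) 0 then
          d.insert (i, j) (PySem.List.pyGetD hb i 0 + 1, PySem.List.pyGetD hb (i + 1) 0,
                           PySem.List.pyGetD vb j 0 + 1, PySem.List.pyGetD vb (j + 1) 0)
        else d) d (PySem.List.pyRange 0 ((vb.length : Int) - 1))) PySem.Dict.empty
        (PySem.List.pyRange 0 ((hb.length : Int) - 1))).get? (ci, cj) with
     | some (r1, r2, c1, c2) => pvPaintCellA color r1 r2 c1 c2 g
     | none => g)
    = (match (if PySem.List.pyGetD hb ci 0 + 1 < PySem.List.pyGetD hb (ci + 1) 0 ∧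
           PySem.List.pyGetD vb cj 0 + 1 < PySem.List.pyGetD vb (cj + 1) 0 then
          some (PySem.List.pyGetD hb ci 0 + 1, PySem.List.pyGetD hb (ci + 1) 0,
                PySem.List.pyGetD vb cj 0 + 1, PySem.List.pyGetD vb (cj + 1) 0)
        else none) with
     | some (r1, r2, c1, c2) => pvPaintCellB color r1 r2 c1 c2 g
     | none => g) := by
  rw [pv_dict_outer]
  by_cases hp : PySem.List.pyGetD hb ci 0 + 1 < PySem.List.pyGetD hb (ci + 1) 0 ∧
      PySem.List.pyGetD vb cj 0 + 1 < PySem.List.pyGetD vb (cj + 1) 0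
  · rw [if_pos ⟨PySem.List.mem_pyRange_one.mpr ⟨h1, h2⟩,
        PySem.List.mem_pyRange_one.mpr ⟨h3, h4⟩, hp⟩, if_pos hp]
    exact pv_paint_cell_eq _ _ _ _ _ g
      (by have := pv_bent hb hhb ci h1 (by omega); omega)
      (by have := pv_bent vb hvb cj h3 (by omega); omega)
  · rw [if_neg (fun hc => hp hc.2.2), if_neg hp]
    simp [PySem.Dict.get?_empty]

-- the two h-line scans compute the same h_lines
theorem pv_hlines_eq (grid : List (List Int))
    (hrows : ∀ row ∈ grid, (grid.headD []).length ≤ row.length) :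
    (PySem.List.pyRange 0 (grid.length : Int)).filter (fun r =>
      (PySem.List.pyRange 0 ((grid.headD []).length : Int)).all (fun c =>
        PySem.List.pyGetD (PySem.List.pyGetD grid r []) c 0 == 5))
    = (PySem.List.pyRange 0 (grid.length : Int)).filter (fun r =>
      (PySem.List.slice (PySem.List.pyGetD grid r []) none
        (some ((grid.headD []).length : Int))).all (fun v => v == 5)) := by
  apply List.filter_congr
  intro r hr
  rw [PySem.List.mem_pyRange_one] at hr
  have hrin : r.toNat < grid.length := by omega
  have hrowmem : PySem.List.pyGetD grid r [] ∈ grid := by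
    rw [PySem.List.pyGetD_of_nonneg _ _ hr.1, List.getD_eq_getElem _ _ hrin]
    exact List.getElem_mem _
  have hle : (grid.headD []).length ≤ (PySem.List.pyGetD grid r []).length :=
    hrows _ hrowmem
  rw [PySem.List.slice_to _ (by omega)]
  have ht : (((grid.headD []).length : Int)).toNat = (grid.headD []).length := by omega
  rw [ht]
  have htake : (PySem.List.pyGetD grid r []).take (grid.headD []).length
      = (List.range (grid.headD []).length).map
          (fun k => (PySem.List.pyGetD grid r []).getD k 0) := by
    apply List.ext_getElem
      (by simp only [List.length_take, List.length_map, List.length_range]; omega)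
    intro k hk1 hk2
    simp only [List.length_map, List.length_range] at hk2
    have hkrow : k < (PySem.List.pyGetD grid r []).length := by omega
    simp only [List.getElem_take, List.getElem_map, List.getElem_range]
    exact (List.getD_eq_getElem _ _ hkrow).symm
  rw [htake, List.all_map, PySem.List.pyRange_zero_natCast, List.all_map]
  simp [Function.comp_def, PySem.List.pyGetD_natCast]

-- the two v-line scans compute the same v_lines
theorem pv_vlines_eq (grid : List (List Int)) :
    (PySem.List.pyRange 0 ((grid.headD []).length : Int)).filter (fun c =>
      (PySem.List.pyRange 0 (grid.length : Int)).all (fun r =>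
        PySem.List.pyGetD (PySem.List.pyGetD grid r []) c 0 == 5))
    = (PySem.List.pyRange 0 ((grid.headD []).length : Int)).filter (fun c =>
      grid.all (fun row => PySem.List.pyGetD row c 0 == 5)) := by
  apply List.filter_congr
  intro c _
  rw [PySem.List.pyRange_zero_natCast, List.all_map, Bool.eq_iff_iff]
  simp only [List.all_eq_true, List.mem_range, Function.comp]
  constructor
  · intro h x hx
    obtain ⟨k, hk, rfl⟩ := List.mem_iff_getElem.mp hx
    have hkk := h k hk
    rwa [PySem.List.pyGetD_natCast, List.getD_eq_getElem _ _ hk] at hkk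
  · intro h k hk
    rw [PySem.List.pyGetD_natCast, List.getD_eq_getElem _ _ hk]
    exact h _ (List.getElem_mem _)

-- a pointwise map that changes nothing is the identity
theorem pv_pmap_congr_id (f : Int → Int → Int → Int) (g : List (List Int))
    (h : ∀ r c v, f r c v = v) : pvPmap f g = g := by
  unfold pvPmap
  have : (PySem.List.enumerate g).map (fun rp =>
      (PySem.List.enumerate rp.2).map (fun cp => f rp.1 cp.1 cp.2))
      = (PySem.List.enumerate g).map (fun rp => rp.2) := by
    apply List.map_congr_left
    intro rp _
    have : (PySem.List.enumerate rp.2).map (fun cp => f rp.1 cp.1 cp.2)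
        = (PySem.List.enumerate rp.2).map (fun cp => cp.2) := by
      apply List.map_congr_left
      intro cp _
      exact h _ _ _
    rw [this, PySem.List.map_snd_enumerate]
  rw [this, PySem.List.map_snd_enumerate]

-- two pointwise maps compose pointwise
theorem pv_pmap_pmap (f g : Int → Int → Int → Int) (x : List (List Int)) :
    pvPmap f (pvPmap g x) = pvPmap (fun r c v => f r c (g r c v)) x := by
  unfold pvPmap
  apply pv_map_enum_ext _ _ _ _ (by simp [PySem.List.length_enumerate])
  intro k hk
  have hk' : k < x.length := by simpa [PySem.List.length_enumerate] using hk
  dsimp only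
  have hrow : ((PySem.List.enumerate x).map (fun rp =>
      (PySem.List.enumerate rp.2).map (fun cp => g rp.1 cp.1 cp.2)))[k]'(by
        simpa [PySem.List.length_enumerate] using hk)
      = (PySem.List.enumerate (x[k]'hk')).map (fun cp => g (k : Int) cp.1 cp.2) := by
    simp [PySem.List.getElem_enumerate]
  rw [hrow]
  apply pv_map_enum_ext _ _ _ _ (by simp [PySem.List.length_enumerate])
  intro j hj
  have hj' : j < (x[k]'hk').length := by
    simpa [PySem.List.length_enumerate] using hj
  dsimp only
  have : ((PySem.List.enumerate (x[k]'hk')).map (fun cp => g (k : Int) cp.1 cp.2))[j]'(by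
      simpa [PySem.List.length_enumerate] using hj)
      = g (k : Int) (j : Int) ((x[k]'hk')[j]'hj') := by
    simp [PySem.List.getElem_enumerate]
  rw [this]

-- the per-cell match step is the pointwise step
theorem pv_match_eq_pmap (HB VB : List Int) (ci cj color : Int) (g : List (List Int)) :
    (match (if PySem.List.pyGetD HB ci 0 + 1 < PySem.List.pyGetD HB (ci + 1) 0 ∧
           PySem.List.pyGetD VB cj 0 + 1 < PySem.List.pyGetD VB (cj + 1) 0 then
          some (PySem.List.pyGetD HB ci 0 + 1, PySem.List.pyGetD HB (ci + 1) 0,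
                PySem.List.pyGetD VB cj 0 + 1, PySem.List.pyGetD VB (cj + 1) 0)
        else none) with
     | some (r1, r2, c1, c2) => pvPaintCellB color r1 r2 c1 c2 g
     | none => g)
    = pvPmap (pvStep HB VB ci cj color) g := by
  split_ifs with hv
  · rfl
  · rw [pv_pmap_congr_id]
    intro r c v
    unfold pvStep
    rw [if_neg]
    rintro ⟨a1, a2, a3, a4, -⟩
    exact hv ⟨by omega, by omega⟩

-- indexing behind a cons with a positive Int index
theorem pv_pyGetD_cons_succ (x : Int) (xs : List Int) (i : Int) (d : Int) (h : 1 ≤ i) :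
    PySem.List.pyGetD (x :: xs) i d = PySem.List.pyGetD xs (i - 1) d := by
  rw [PySem.List.pyGetD_of_nonneg _ _ (by omega), PySem.List.pyGetD_of_nonneg _ _ (by omega)]
  have : i.toNat = (i - 1).toNat + 1 := by omega
  rw [this]
  rfl

-- the bounds list of a line scan is strictly increasing
theorem pv_sorted_bounds (p : Int → Bool) (N : Int) (hN : 0 ≤ N) :
    (-1 :: ((PySem.List.pyRange 0 N).filter p ++ [N])).Pairwise (· < ·) := by
  have hmem : ∀ x ∈ (PySem.List.pyRange 0 N).filter p, 0 ≤ x ∧ x < N := by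
    intro x hx
    rw [List.mem_filter] at hx
    exact PySem.List.mem_pyRange_one.mp hx.1
  refine List.pairwise_cons.mpr ⟨?_, ?_⟩
  · intro y hy
    rcases List.mem_append.mp hy with h | h
    · have := hmem _ h; omega
    · simp only [List.mem_singleton] at h; omega
  · refine List.pairwise_append.mpr ⟨?_, ?_, ?_⟩
    · exact (PySem.List.pairwise_lt_pyRange_one (a := 0) (b := N)).filter p
    · simp
    · intro a ha b hb
      simp only [List.mem_singleton] at hb
      subst hb
      exact (hmem _ ha).2

-- a member of a strictly increasing list never lies strictly between consecutive entries
theorem pv_mem_not_between (B : List Int) (hs : B.Pairwise (· < ·)) (x : Int) (hx : x ∈ B)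
    (i : Int) (h0 : 0 ≤ i) (hi : i + 1 < (B.length : Int)) :
    ¬ (PySem.List.pyGetD B i 0 < x ∧ x < PySem.List.pyGetD B (i + 1) 0) := by
  rintro ⟨hlt, hgt⟩
  obtain ⟨j, hj, rfl⟩ := List.mem_iff_getElem.mp hx
  rw [PySem.List.pyGetD_eq_getElem _ _ h0 (by omega)] at hlt
  rw [PySem.List.pyGetD_eq_getElem _ _ (by omega) (by omega)] at hgt
  have hrel := List.pairwise_iff_getElem.mp hs
  by_cases hc : j ≤ i.toNat
  · rcases Nat.lt_or_ge j i.toNat with h | h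
    · have := hrel j i.toNat (by omega) (by omega) h
      omega
    · have : j = i.toNat := by omega
      subst this
      omega
  · have hge : (i + 1).toNat ≤ j := by omega
    rcases Nat.lt_or_ge (i + 1).toNat j with h | h
    · have := hrel (i + 1).toNat j (by omega) hj h
      omega
    · have : (i + 1).toNat = j := by omega
      subst this
      omega

-- the interval of the bounds list containing r is exactly the number of entries below r
theorem pv_interval (L : List Int) (lo hi r : Int)
    (hs : (lo :: (L ++ [hi])).Pairwise (· < ·))
    (hlo : lo < r) (hhi : r < hi) (hnm : r ∉ L) :
    ∀ i : Int, 0 ≤ i → i < (L.length : Int) + 1 →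
    ((PySem.List.pyGetD (lo :: (L ++ [hi])) i 0 < r ∧
      r < PySem.List.pyGetD (lo :: (L ++ [hi])) (i + 1) 0)
     ↔ i = ((L.filter (fun l => decide (l < r))).length : Int)) := by
  induction L generalizing lo with
  | nil =>
    intro i h0 hi1
    have : i = 0 := by
      simp only [List.length_nil, Nat.cast_zero] at hi1
      omega
    subst this
    simp only [List.nil_append, List.filter_nil, List.length_nil, Nat.cast_zero]
    rw [PySem.List.pyGetD_zero_cons, pv_pyGetD_cons_succ _ _ (0 + 1) _ (by omega)]
    norm_num
    exact ⟨hlo, hhi⟩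
  | cons a t ih =>
    intro i h0 hi1
    simp only [List.cons_append] at hs ⊢
    simp only [List.length_cons] at hi1
    have hs' : (a :: (t ++ [hi])).Pairwise (· < ·) := (List.pairwise_cons.mp hs).2
    have hat : ∀ x ∈ t ++ [hi], a < x := (List.pairwise_cons.mp hs').1
    have hra : r ≠ a := by
      intro h; exact hnm (by simp [h])
    have hrt : r ∉ t := fun h => hnm (by simp [h])
    by_cases hlt : r < a
    · -- r is below a: the filter is empty
      have hft : t.filter (fun l => decide (l < r)) = [] := by
        rw [List.filter_eq_nil_iff]
        intro x hx
        have := hat x (by simp [hx])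
        simp only [decide_eq_true_eq]
        omega
      have hfa : (a :: t).filter (fun l => decide (l < r)) = [] := by
        rw [List.filter_cons_of_neg (by simp; omega), hft]
      rw [hfa]
      simp only [List.length_nil, Nat.cast_zero]
      by_cases hi0 : i = 0
      · subst hi0
        rw [PySem.List.pyGetD_zero_cons, pv_pyGetD_cons_succ _ _ (0 + 1) _ (by omega)]
        norm_num
        exact ⟨hlo, hlt⟩
      · -- i ≥ 1 : the lower bound is ≥ a > r
        have h1i : 1 ≤ i := by omega
        rw [pv_pyGetD_cons_succ _ _ i _ h1i]
        have hmem : PySem.List.pyGetD (a :: (t ++ [hi])) (i - 1) 0 ∈ a :: (t ++ [hi]) := by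
          apply PySem.List.pyGetD_mem
          refine ⟨by omega, ?_⟩
          simp only [List.length_cons, List.length_append]
          push_cast
          omega
        have hgea : a ≤ PySem.List.pyGetD (a :: (t ++ [hi])) (i - 1) 0 := by
          rcases List.mem_cons.mp hmem with h | h
          · omega
          · have := hat _ h; omega
        constructor
        · rintro ⟨hx, -⟩
          omega
        · intro h; omega
    · have har : a < r := by omega
      have hfa : (a :: t).filter (fun l => decide (l < r))
          = a :: t.filter (fun l => decide (l < r)) := by
        rw [List.filter_cons_of_pos (by simp; omega)]
      rw [hfa]
      by_cases hi0 : i = 0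
      · subst hi0
        rw [PySem.List.pyGetD_zero_cons, pv_pyGetD_cons_succ _ _ (0 + 1) _ (by omega)]
        have ha' : PySem.List.pyGetD (a :: (t ++ [hi])) (0 + 1 - 1) 0 = a := by
          norm_num [PySem.List.pyGetD_zero_cons]
        rw [ha']
        simp only [List.length_cons]
        constructor
        · rintro ⟨-, hx⟩; omega
        · intro h
          exfalso
          push_cast at h
          omega
      · have h1i : 1 ≤ i := by omega
        rw [pv_pyGetD_cons_succ _ _ i _ h1i, pv_pyGetD_cons_succ _ _ (i + 1) _ (by omega)]
        have e2 : i + 1 - 1 = (i - 1) + 1 := by omega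
        rw [e2]
        have hiff := ih a hs' har hrt (i - 1) (by omega) (by push_cast at hi1 ⊢; omega)
        rw [hiff]
        simp only [List.length_cons]
        push_cast
        omega

-- count of true among the first k sweep entries = number of detected lines below k
theorem pv_countP_restrict (q : Nat → Bool) (k N : Nat) (hk : k ≤ N) :
    (List.range N).countP (fun j => decide (j < k) && q j) = (List.range k).countP q := by
  rw [show N = k + (N - k) by omega, List.range_add, List.countP_append]
  have h2 : ((List.range (N - k)).map (fun j => k + j)).countP
      (fun j => decide (j < k) && q j) = 0 := by
    rw [List.countP_eq_zero]
    intro a ha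
    obtain ⟨j, hj, rfl⟩ := List.mem_map.mp ha
    simp
  rw [h2, Nat.add_zero]
  apply List.countP_congr
  intro a ha
  have := List.mem_range.mp ha
  simp [this]

theorem pv_count_bridge (p : Int → Bool) (N r : Int) (hN : 0 ≤ N)
    (h0 : 0 ≤ r) (hr : r ≤ N) :
    ((PySem.List.slice ((PySem.List.pyRange 0 N).map p) none (some r)).count true : Int)
    = ((((PySem.List.pyRange 0 N).filter p).filter (fun l => decide (l < r))).length : Int) := by
  have hNn : N = ((N.toNat : Nat) : Int) := by omega
  rw [PySem.List.slice_to _ h0]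
  rw [hNn, PySem.List.pyRange_zero_natCast]
  congr 1
  rw [List.map_map, ← List.map_take, List.take_range]
  have hmin : min r.toNat N.toNat = r.toNat := by omega
  rw [hmin]
  rw [List.count_eq_countP, List.countP_map, List.filter_filter, List.filter_map,
      List.length_map, ← List.countP_eq_length_filter]
  have e1 : (List.range r.toNat).countP ((fun x => x == true) ∘ p ∘ (fun (k : Nat) => ((k : Int))))
      = (List.range r.toNat).countP (fun j : Nat => p (j : Int)) :=
    List.countP_congr (by intro a _; simp)
  have e2 : (List.range N.toNat).countP ((fun a => decide (a < r) && p a) ∘ (fun (k : Nat) => ((k : Int))))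
      = (List.range N.toNat).countP (fun j : Nat => decide (j < r.toNat) && p (j : Int)) := by
    apply List.countP_congr
    intro a _
    have hiff : ((a : Int) < r) ↔ (a < r.toNat) := by omega
    simp only [Function.comp_apply, Bool.and_eq_true, decide_eq_true_eq, hiff]
  rw [e1, e2, pv_countP_restrict _ _ _ (by omega)]

-- number of true entries of the sweep = number of detected lines
theorem pv_count_lines (p : Int → Bool) (N : Int) :
    ((PySem.List.pyRange 0 N).map p).count true
    = ((PySem.List.pyRange 0 N).filter p).length := by
  rw [List.count_eq_countP, List.countP_map, ← List.countP_eq_length_filter]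
  apply List.countP_congr
  intro x _
  simp

-- entries of a bounds list are at most the upper sentinel
theorem pv_bounds_le (p : Int → Bool) (N : Int) (hN : 0 ≤ N) (i : Int)
    (h0 : 0 ≤ i) (hi : i < ((-1 :: ((PySem.List.pyRange 0 N).filter p ++ [N])).length : Int)) :
    PySem.List.pyGetD (-1 :: ((PySem.List.pyRange 0 N).filter p ++ [N])) i 0 ≤ N := by
  have hmem : PySem.List.pyGetD (-1 :: ((PySem.List.pyRange 0 N).filter p ++ [N])) i 0
      ∈ -1 :: ((PySem.List.pyRange 0 N).filter p ++ [N]) := by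
    apply PySem.List.pyGetD_mem
    exact ⟨by omega, hi⟩
  rcases List.mem_cons.mp hmem with h | h
  · omega
  · rcases List.mem_append.mp h with h | h
    · rw [List.mem_filter] at h
      have := PySem.List.mem_pyRange_one.mp h.1
      omega
    · simp only [List.mem_singleton] at h
      omega

-- THE CORE: the composition of the three pointwise cell paintings equals B's pixel classifier
theorem pv_core (hp vp : Int → Bool) (R C : Int) (HB VB : List Int) (n m : Int)
    (hHB : HB = -1 :: ((PySem.List.pyRange 0 R).filter hp ++ [R]))
    (hVB : VB = -1 :: ((PySem.List.pyRange 0 C).filter vp ++ [C]))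
    (hn : n = (HB.length : Int) - 1) (hm : m = (VB.length : Int) - 1)
    (hR : 1 ≤ R) (hC : 0 ≤ C)
    (r c v : Int) (hr0 : 0 ≤ r) (hrR : r < R) (hc0 : 0 ≤ c) :
    pvStep HB VB (n - 1) (m - 1) 3 r c
      (pvStep HB VB (PySem.Int.floordiv n 2) (PySem.Int.floordiv m 2) 2 r c
        (pvStep HB VB 0 0 1 r c v))
    = (if C ≤ c ∨ ¬ v = 0 ∨ PySem.List.pyGetD ((PySem.List.pyRange 0 R).map hp) r false = true
          ∨ PySem.List.pyGetD ((PySem.List.pyRange 0 C).map vp) c false = true then v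
       else PySem.Dict.getD
         ((((PySem.Dict.empty : PySem.Dict (Int × Int) Int).insert
             ((((PySem.List.pyRange 0 R).map hp).count true : Int) + 1 - 1,
              (((PySem.List.pyRange 0 C).map vp).count true : Int) + 1 - 1) 3).insert
             (PySem.Int.floordiv ((((PySem.List.pyRange 0 R).map hp).count true : Int) + 1) 2,
              PySem.Int.floordiv ((((PySem.List.pyRange 0 C).map vp).count true : Int) + 1) 2) 2).insert
             (0, 0) 1)
         (PySem.List.pyGetD ((PySem.List.pyRange 0 R).map (fun x =>
             ((PySem.List.slice ((PySem.List.pyRange 0 R).map hp) none (some x)).count true : Int))) r 0,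
          PySem.List.pyGetD ((PySem.List.pyRange 0 C).map (fun x =>
             ((PySem.List.slice ((PySem.List.pyRange 0 C).map vp) none (some x)).count true : Int))) c 0) 0) := by
  have hlenHB : HB.length = ((PySem.List.pyRange 0 R).filter hp).length + 2 := by
    rw [hHB]; simp
  have hlenVB : VB.length = ((PySem.List.pyRange 0 C).filter vp).length + 2 := by
    rw [hVB]; simp
  set H := (PySem.List.pyRange 0 R).filter hp with hHdef
  set V := (PySem.List.pyRange 0 C).filter vp with hVdef
  have hnH : n = (H.length : Int) + 1 := by omega
  have hmV : m = (V.length : Int) + 1 := by omega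
  have hn1 : 1 ≤ n := by omega
  have hm1 : 1 ≤ m := by omega
  have hfdn : PySem.Int.floordiv n 2 = n / 2 := PySem.Int.floordiv_eq_ediv_of_pos (by norm_num)
  have hfdm : PySem.Int.floordiv m 2 = m / 2 := PySem.Int.floordiv_eq_ediv_of_pos (by norm_num)
  have hsHB : HB.Pairwise (· < ·) := by
    rw [hHB]; exact pv_sorted_bounds hp R (by omega)
  have hsVB : VB.Pairwise (· < ·) := by
    rw [hVB]; exact pv_sorted_bounds vp C hC
  have hVBle : ∀ i, 0 ≤ i → i < (VB.length : Int) → PySem.List.pyGetD VB i 0 ≤ C := by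
    intro i h1 h2
    rw [hVB] at h2 ⊢
    exact pv_bounds_le vp C hC i h1 h2
  by_cases hcC : C ≤ c
  · rw [if_pos (Or.inl hcC)]
    have hnof : ∀ ci cj color v', 0 ≤ cj → cj < m → pvStep HB VB ci cj color r c v' = v' := by
      intro ci cj color v' h1 h2
      unfold pvStep
      rw [if_neg]
      rintro ⟨-, -, -, h4, -⟩
      have := hVBle (cj + 1) (by omega) (by omega)
      omega
    rw [hnof 0 0 1 v (by omega) (by omega),
        hnof (PySem.Int.floordiv n 2) (PySem.Int.floordiv m 2) 2 v
          (by rw [hfdm]; omega) (by rw [hfdm]; omega),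
        hnof (n - 1) (m - 1) 3 v (by omega) (by omega)]
  · rw [not_le] at hcC
    have hlh : PySem.List.pyGetD ((PySem.List.pyRange 0 R).map hp) r false = hp r :=
      PySem.List.pyGetD_map_pyRange_of_nonneg _ _ _ _ hr0 hrR
    have hlv : PySem.List.pyGetD ((PySem.List.pyRange 0 C).map vp) c false = vp c :=
      PySem.List.pyGetD_map_pyRange_of_nonneg _ _ _ _ hc0 hcC
    rw [hlh, hlv]
    by_cases hv : v = 0
    case neg =>
      rw [if_pos (Or.inr (Or.inl hv))]
      have hkeep : ∀ ci cj color, pvStep HB VB ci cj color r c v = v := by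
        intro ci cj color
        unfold pvStep
        rw [if_neg]
        rintro ⟨-, -, -, -, h5⟩
        exact hv h5
      rw [hkeep, hkeep, hkeep]
    case pos =>
      subst hv
      by_cases hhp : hp r = true
      · rw [if_pos (Or.inr (Or.inr (Or.inl hhp)))]
        have hrHB : r ∈ HB := by
          rw [hHB]
          exact List.mem_cons_of_mem _ (List.mem_append_left _
            (List.mem_filter.mpr ⟨PySem.List.mem_pyRange_one.mpr ⟨hr0, hrR⟩, hhp⟩))
        have hnofH : ∀ ci cj color v', 0 ≤ ci → ci < n → pvStep HB VB ci cj color r c v' = v' := by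
          intro ci cj color v' h1 h2
          unfold pvStep
          rw [if_neg]
          rintro ⟨h1', h2', -⟩
          exact pv_mem_not_between HB hsHB r hrHB ci h1 (by omega) ⟨by omega, h2'⟩
        rw [hnofH 0 0 1 0 (by omega) (by omega),
            hnofH (PySem.Int.floordiv n 2) (PySem.Int.floordiv m 2) 2 0
              (by rw [hfdn]; omega) (by rw [hfdn]; omega),
            hnofH (n - 1) (m - 1) 3 0 (by omega) (by omega)]
      · by_cases hvp : vp c = true
        · rw [if_pos (Or.inr (Or.inr (Or.inr hvp)))]
          have hcVB : c ∈ VB := by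
            rw [hVB]
            exact List.mem_cons_of_mem _ (List.mem_append_left _
              (List.mem_filter.mpr ⟨PySem.List.mem_pyRange_one.mpr ⟨hc0, hcC⟩, hvp⟩))
          have hnofV : ∀ ci cj color v', 0 ≤ cj → cj < m → pvStep HB VB ci cj color r c v' = v' := by
            intro ci cj color v' h1 h2
            unfold pvStep
            rw [if_neg]
            rintro ⟨-, -, h3', h4', -⟩
            exact pv_mem_not_between VB hsVB c hcVB cj h1 (by omega) ⟨by omega, h4'⟩
          rw [hnofV 0 0 1 0 (by omega) (by omega),
              hnofV (PySem.Int.floordiv n 2) (PySem.Int.floordiv m 2) 2 0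
                (by rw [hfdm]; omega) (by rw [hfdm]; omega),
              hnofV (n - 1) (m - 1) 3 0 (by omega) (by omega)]
        · rw [if_neg (by
            rintro (h | h | h | h)
            · omega
            · exact h rfl
            · exact hhp h
            · exact hvp h)]
          set IR := ((H.filter (fun l => decide (l < r))).length : Int) with hIRdef
          set JC := ((V.filter (fun l => decide (l < c))).length : Int) with hJCdef
          have hlCI : PySem.List.pyGetD ((PySem.List.pyRange 0 R).map (fun x =>
              ((PySem.List.slice ((PySem.List.pyRange 0 R).map hp) none (some x)).count true : Int))) r 0
              = IR := by
            rw [PySem.List.pyGetD_map_pyRange_of_nonneg _ _ _ _ hr0 hrR]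
            exact pv_count_bridge hp R r (by omega) hr0 (by omega)
          have hlCJ : PySem.List.pyGetD ((PySem.List.pyRange 0 C).map (fun x =>
              ((PySem.List.slice ((PySem.List.pyRange 0 C).map vp) none (some x)).count true : Int))) c 0
              = JC := by
            rw [PySem.List.pyGetD_map_pyRange_of_nonneg _ _ _ _ hc0 hcC]
            exact pv_count_bridge vp C c hC hc0 (by omega)
          rw [hlCI, hlCJ]
          have hcnt : ((((PySem.List.pyRange 0 R).map hp).count true : Nat) : Int) = (H.length : Int) := by
            exact_mod_cast pv_count_lines hp R
          have hcntV : ((((PySem.List.pyRange 0 C).map vp).count true : Nat) : Int) = (V.length : Int) := by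
            exact_mod_cast pv_count_lines vp C
          rw [hcnt, hcntV]
          have hne : (H.length : Int) + 1 = n := by omega
          have hme : (V.length : Int) + 1 = m := by omega
          rw [hne, hme]
          have hIRb : 0 ≤ IR ∧ IR < n := by
            have := List.length_filter_le (fun l => decide (l < r)) H
            omega
          have hJCb : 0 ≤ JC ∧ JC < m := by
            have := List.length_filter_le (fun l => decide (l < c)) V
            omega
          have hrH : r ∉ H := fun hmem => hhp (List.mem_filter.mp hmem).2
          have hcV : c ∉ V := fun hmem => hvp (List.mem_filter.mp hmem).2
          have hrowiff : ∀ i, 0 ≤ i → i < n →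
              ((PySem.List.pyGetD HB i 0 + 1 ≤ r ∧ r < PySem.List.pyGetD HB (i + 1) 0) ↔ i = IR) := by
            intro i h1 h2
            have hsH' : (-1 :: (H ++ [R])).Pairwise (· < ·) := by rw [hHB] at hsHB; exact hsHB
            have base := pv_interval H (-1) R r hsH' (by omega) hrR hrH i h1 (by omega)
            rw [hHB]
            constructor
            · rintro ⟨x, y⟩; exact base.mp ⟨by omega, y⟩
            · intro h; obtain ⟨x, y⟩ := base.mpr h; exact ⟨by omega, y⟩
          have hcoliff : ∀ j, 0 ≤ j → j < m →
              ((PySem.List.pyGetD VB j 0 + 1 ≤ c ∧ c < PySem.List.pyGetD VB (j + 1) 0) ↔ j = JC) := by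
            intro j h1 h2
            have hsV' : (-1 :: (V ++ [C])).Pairwise (· < ·) := by rw [hVB] at hsVB; exact hsVB
            have base := pv_interval V (-1) C c hsV' (by omega) hcC hcV j h1 (by omega)
            rw [hVB]
            constructor
            · rintro ⟨x, y⟩; exact base.mp ⟨by omega, y⟩
            · intro h; obtain ⟨x, y⟩ := base.mpr h; exact ⟨by omega, y⟩
          have hfire : ∀ i j color v', 0 ≤ i → i < n → 0 ≤ j → j < m →
              pvStep HB VB i j color r c v' = if i = IR ∧ j = JC ∧ v' = 0 then color else v' := by
            intro i j color v' h1 h2 h3 h4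
            unfold pvStep
            by_cases hk : i = IR ∧ j = JC ∧ v' = 0
            · obtain ⟨hA, hB⟩ := (hrowiff i h1 h2).mpr hk.1
              obtain ⟨hc1, hc2⟩ := (hcoliff j h3 h4).mpr hk.2.1
              rw [if_pos ⟨hA, hB, hc1, hc2, hk.2.2⟩, if_pos hk]
            · rw [if_neg, if_neg hk]
              rintro ⟨a1, a2, a3, a4, a5⟩
              exact hk ⟨(hrowiff i h1 h2).mp ⟨a1, a2⟩, (hcoliff j h3 h4).mp ⟨a3, a4⟩, a5⟩
          rw [hfire 0 0 1 0 (by omega) (by omega) (by omega) (by omega)]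
          rw [hfire (PySem.Int.floordiv n 2) (PySem.Int.floordiv m 2) 2 _
              (by rw [hfdn]; omega) (by rw [hfdn]; omega) (by rw [hfdm]; omega) (by rw [hfdm]; omega)]
          rw [hfire (n - 1) (m - 1) 3 _ (by omega) (by omega) (by omega) (by omega)]
          rw [PySem.Dict.getD_insert, PySem.Dict.getD_insert, PySem.Dict.getD_insert]
          have hemp : (PySem.Dict.empty : PySem.Dict (Int × Int) Int).getD (IR, JC) 0 = 0 := by
            simp [PySem.Dict.getD_eq_get?_getD, PySem.Dict.get?_empty]
          rw [hemp]
          simp only [Prod.mk.injEq, and_true]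
          rw [hfdn, hfdm]
          split_ifs <;> omega


-- ===== VERDICT (by name: the statement is the Claim_ definition above) =====
set_option maxHeartbeats 1600000 in
theorem solve_941d9a10_spec : Claim_equal_solve_941d9a10 := by
  intro grid _ hpre
  obtain ⟨hne, hrows⟩ := hpre
  unfold Spec_solve_941d9a10 solve_941d9a10 solve_941d9a10_alt
  dsimp only
  rw [pv_hlines_eq grid hrows, pv_vlines_eq grid]
  set R : Int := (grid.length : Int) with hR
  set C : Int := ((grid.headD []).length : Int) with hC
  set H : List Int := (PySem.List.pyRange 0 R).filter (fun r =>
    (PySem.List.slice (PySem.List.pyGetD grid r []) none (some C)).all (fun v => v == 5)) with hH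
  set V : List Int := (PySem.List.pyRange 0 C).filter (fun c =>
    grid.all (fun row => PySem.List.pyGetD row c 0 == 5)) with hV
  set HB : List Int := [(-1 : Int)] ++ H ++ [R] with hHB
  set VB : List Int := [(-1 : Int)] ++ V ++ [C] with hVB
  have hHBlen : 2 ≤ HB.length := by
    rw [hHB]
    simp only [List.length_append, List.length_cons, List.length_nil]
    omega
  have hVBlen : 2 ≤ VB.length := by
    rw [hVB]
    simp only [List.length_append, List.length_cons, List.length_nil]
    omega
  have hHBge : ∀ x ∈ HB, -1 ≤ x := by
    rw [hHB]
    intro x hx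
    simp only [List.mem_append, List.mem_singleton] at hx
    rcases hx with (rfl | h) | rfl
    · omega
    · rw [hH] at h
      rw [List.mem_filter] at h
      have := PySem.List.mem_pyRange_one.mp h.1; omega
    · rw [hR]; omega
  have hVBge : ∀ x ∈ VB, -1 ≤ x := by
    rw [hVB]
    intro x hx
    simp only [List.mem_append, List.mem_singleton] at hx
    rcases hx with (rfl | h) | rfl
    · omega
    · rw [hV] at h
      rw [List.mem_filter] at h
      have := PySem.List.mem_pyRange_one.mp h.1; omega
    · rw [hC]; omega
  have hdn : PySem.Int.floordiv ((HB.length : Int) - 1) 2 = ((HB.length : Int) - 1) / 2 :=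
    PySem.Int.floordiv_eq_ediv_of_pos (by norm_num)
  have hdm : PySem.Int.floordiv ((VB.length : Int) - 1) 2 = ((VB.length : Int) - 1) / 2 :=
    PySem.Int.floordiv_eq_ediv_of_pos (by norm_num)
  simp only [List.foldl_cons, List.foldl_nil]
  rw [pv_key_eq HB VB hHBge hVBge 0 0 1 (by omega) (by omega) (by omega) (by omega)]
  rw [pv_key_eq HB VB hHBge hVBge (PySem.Int.floordiv ((HB.length : Int) - 1) 2)
      (PySem.Int.floordiv ((VB.length : Int) - 1) 2) 2
      (by rw [hdn]; omega) (by rw [hdn]; omega) (by rw [hdm]; omega) (by rw [hdm]; omega)]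
  rw [pv_key_eq HB VB hHBge hVBge ((HB.length : Int) - 1 - 1) ((VB.length : Int) - 1 - 1) 3
      (by omega) (by omega) (by omega) (by omega)]
  simp only [pv_match_eq_pmap]
  rw [pv_pmap_pmap, pv_pmap_pmap]
  have hR1 : 1 ≤ R := by
    rw [hR]
    have := List.length_pos_iff.mpr hne
    omega
  have hC0 : 0 ≤ C := by rw [hC]; omega
  unfold pvPmap
  apply pv_map_enum_ext _ _ _ _ rfl
  intro k hk
  dsimp only
  apply pv_map_enum_ext _ _ _ _ rfl
  intro j hj
  dsimp only
  exact pv_core _ _ R C HB VB ((HB.length : Int) - 1) ((VB.length : Int) - 1)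
    (by rw [hHB]; rfl) (by rw [hVB]; rfl) rfl rfl hR1 hC0
    (k : Int) (j : Int) _ (by omega) (by rw [hR]; exact_mod_cast hk) (by omega)
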